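-- pv_equiv track=rewrite | github.com/bmmeijers/mapedge | src/mapedge/lib/trace/detect_frame.py | transform_to_square
-- ===== SOURCE A (Python) =====
-- import math
--
-- def transform_to_square(lst):
--     n = len(lst)
--     size = math.isqrt(n)
--     if size * size != n:
--         size += 1
--     matrix = [lst[i * size : i * size + size] for i in range(size)]
--
--     for row in matrix:
--         while len(row) != size:
--             row.append(None)
--     return matrix
-- ===== SOURCE B (Python) =====
-- def transform_to_square(lst):
--     size = 0
--     while size * size < len(lst):
--         size += 1
--     rows = []
--     cur = []
--     for x in lst:
--         cur.append(x)
--         if len(cur) == size: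
--             rows.append(cur)
--             cur = []
--     if cur:
--         cur.extend([None] * (size - len(cur)))
--         rows.append(cur)
--     while len(rows) < size:
--         rows.append([None] * size)
--     return rows
-- ===== Notes on version B (the rewrite author's own statement) =====
-- stated objective: alternative
-- what changed: B streams the elements once through a current-row accumulator (flush when full, pad the last partial row, then top up with all-None rows), with size found by linear search for the least s with s*s>=n; no isqrt, no index arithmetic and no slicing, versus A's range-indexed slice comprehension with per-row while-loop padding.
import Mathlib
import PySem

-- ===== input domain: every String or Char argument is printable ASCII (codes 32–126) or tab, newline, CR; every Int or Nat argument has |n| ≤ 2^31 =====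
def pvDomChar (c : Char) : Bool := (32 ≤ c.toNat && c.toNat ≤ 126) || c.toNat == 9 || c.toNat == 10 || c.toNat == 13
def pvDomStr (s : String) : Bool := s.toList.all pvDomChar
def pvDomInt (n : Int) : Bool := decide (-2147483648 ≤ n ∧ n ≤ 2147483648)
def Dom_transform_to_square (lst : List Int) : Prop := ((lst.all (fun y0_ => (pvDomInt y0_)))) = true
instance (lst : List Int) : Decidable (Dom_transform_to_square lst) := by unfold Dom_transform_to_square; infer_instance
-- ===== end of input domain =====

-- B builds the rows in one streaming pass with a current-row accumulator (no slicing, size by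
-- linear search instead of isqrt); same values, same O(n) cost.

-- ===== PORT A =====
-- Python's `while len(row) != size: row.append(None)`; the rows fed to it are slices of
-- length ≤ size, on which `!= size` and `< size` coincide (`<` makes termination evident).
def padWhileA (size : Nat) (row : List (Option Int)) : List (Option Int) :=
  if row.length < size then padWhileA size (row ++ [none]) else row
termination_by size - row.length
decreasing_by simp; omega

def transform_to_square (lst : List Int) : List (List (Option Int)) :=
  let n := lst.length
  let size := if Nat.sqrt n * Nat.sqrt n ≠ n then Nat.sqrt n + 1 else Nat.sqrt n
  let matrix := (List.range size).map (fun i =>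
    (PySem.List.slice lst (some ((i * size : Nat) : Int)) (some (((i * size : Nat) : Int) + (size : Int)))).map some)
  matrix.map (padWhileA size)

-- ===== PORT B =====
-- `while size * size < len(lst): size += 1`
def sizeLoopB (n size : Nat) : Nat :=
  if size * size < n then sizeLoopB n (size + 1) else size
termination_by n - size
decreasing_by
  have h : size < n := by nlinarith
  omega

-- the body of B's `for x in lst` loop, acting on the state (rows, cur)
def chunkStepB (size : Nat) (st : List (List (Option Int)) × List (Option Int)) (x : Int) :
    List (List (Option Int)) × List (Option Int) :=
  let cur := st.2 ++ [some x]
  if cur.length = size then (st.1 ++ [cur], []) else (st.1, cur)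

-- `while len(rows) < size: rows.append([None] * size)`
def padRowsB (size : Nat) (rows : List (List (Option Int))) : List (List (Option Int)) :=
  if rows.length < size then padRowsB size (rows ++ [List.replicate size none]) else rows
termination_by size - rows.length
decreasing_by simp; omega

def transform_to_square_alt (lst : List Int) : List (List (Option Int)) :=
  let size := sizeLoopB lst.length 0
  let st := lst.foldl (chunkStepB size) ([], [])
  let rows := if st.2 ≠ [] then st.1 ++ [st.2 ++ List.replicate (size - st.2.length) none] else st.1
  padRowsB size rows

-- ===== PRECONDITION & SPEC =====
def Spec_transform_to_square (lst : List Int) (out : List (List (Option Int))) : Prop := out = transform_to_square_alt lst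
instance (lst : List Int) (out : List (List (Option Int))) : Decidable (Spec_transform_to_square lst out) := by unfold Spec_transform_to_square; infer_instance

-- ===== CLAIM (what is proved, stated in full; the proofs are below) =====
def Claim_equal_transform_to_square : Prop := ∀ (lst : List Int), Dom_transform_to_square lst → Spec_transform_to_square lst (transform_to_square lst)

-- ===== LEMMAS AND PROOFS =====

-- the size A computes: isqrt, bumped unless n is a perfect square
def sizeA (n : Nat) : Nat := if Nat.sqrt n * Nat.sqrt n ≠ n then Nat.sqrt n + 1 else Nat.sqrt n

theorem sizeA_sq_ge (n : Nat) : n ≤ sizeA n * sizeA n := by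
  unfold sizeA
  split_ifs with h
  · have h1 := Nat.lt_succ_sqrt' n
    rw [pow_two, Nat.succ_eq_add_one] at h1
    omega
  · omega

theorem sizeA_min (n s : Nat) (h : s < sizeA n) : s * s < n := by
  unfold sizeA at h
  split_ifs at h with hne
  · have h1 : s ≤ Nat.sqrt n := by omega
    have h2 : s * s ≤ Nat.sqrt n * Nat.sqrt n := Nat.mul_le_mul h1 h1
    have h3 := Nat.sqrt_le' n
    rw [pow_two] at h3
    omega
  · have h1 : s + 1 ≤ Nat.sqrt n := by omega
    have h2 : (s + 1) * (s + 1) ≤ Nat.sqrt n * Nat.sqrt n := Nat.mul_le_mul h1 h1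
    have h3 := Nat.sqrt_le' n
    rw [pow_two] at h3
    nlinarith

theorem sizeLoopB_eq_aux (n s : Nat) (hs : s ≤ sizeA n) : sizeLoopB n s = sizeA n := by
  rw [sizeLoopB]
  by_cases h : s * s < n
  · have hlt : s < sizeA n := by
      by_contra hge
      have : sizeA n ≤ s := by omega
      have := Nat.mul_le_mul this this
      have := sizeA_sq_ge n
      omega
    rw [if_pos h]
    exact sizeLoopB_eq_aux n (s + 1) hlt
  · rw [if_neg h]
    by_contra hne
    have hlt : s < sizeA n := by omega
    have := sizeA_min n s hlt
    omega
termination_by sizeA n - s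
decreasing_by omega

theorem sizeLoopB_eq (n : Nat) : sizeLoopB n 0 = sizeA n :=
  sizeLoopB_eq_aux n 0 (Nat.zero_le _)

theorem padWhileA_eq (size : Nat) (r : List (Option Int)) :
    padWhileA size r = r ++ List.replicate (size - r.length) none := by
  by_cases h : r.length < size
  · rw [padWhileA, if_pos h, padWhileA_eq size (r ++ [none])]
    have hk : size - r.length = (size - (r.length + 1)) + 1 := by omega
    rw [hk, List.append_assoc]
    simp [List.replicate_succ]
  · rw [padWhileA, if_neg h]
    have : size - r.length = 0 := by omega
    simp [this]
termination_by size - r.length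
decreasing_by simp; omega

theorem padRowsB_eq (size : Nat) (rows : List (List (Option Int))) :
    padRowsB size rows = rows ++ List.replicate (size - rows.length) (List.replicate size none) := by
  by_cases h : rows.length < size
  · rw [padRowsB, if_pos h, padRowsB_eq size (rows ++ [List.replicate size none])]
    have hk : size - rows.length = (size - (rows.length + 1)) + 1 := by omega
    rw [hk, List.append_assoc]
    simp [List.replicate_succ]
  · rw [padRowsB, if_neg h]
    have : size - rows.length = 0 := by omega
    simp [this]
termination_by size - rows.length
decreasing_by simp; omega

-- the full chunks and the trailing partial chunk produced by B's streaming loop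
def fullchunksB (size : Nat) (xs : List Int) : List (List (Option Int)) :=
  if _h : 0 < size ∧ size ≤ xs.length then
    (xs.take size).map some :: fullchunksB size (xs.drop size)
  else []
termination_by xs.length
decreasing_by simp; omega

def leftoverB (size : Nat) (xs : List Int) : List (Option Int) :=
  if _h : 0 < size ∧ size ≤ xs.length then leftoverB size (xs.drop size)
  else xs.map some
termination_by xs.length
decreasing_by simp; omega

theorem fold_small (size : Nat) (ys : List Int) :
    ∀ (rows : List (List (Option Int))) (cur : List (Option Int)),
      cur.length + ys.length < size →
      ys.foldl (chunkStepB size) (rows, cur) = (rows, cur ++ ys.map some) := by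
  induction ys with
  | nil => intro rows cur _; simp
  | cons y ys ih =>
    intro rows cur h
    simp only [List.length_cons] at h
    simp only [List.foldl_cons, chunkStepB]
    have : ¬ ((cur ++ [some y]).length = size) := by simp; omega
    rw [if_neg this]
    have := ih rows (cur ++ [some y]) (by simp; omega)
    simp only [this]
    simp

theorem fold_fill (size : Nat) (ys : List Int) :
    ∀ (rows : List (List (Option Int))) (cur : List (Option Int)),
      ys ≠ [] → cur.length + ys.length = size →
      ys.foldl (chunkStepB size) (rows, cur) = (rows ++ [cur ++ ys.map some], []) := by
  induction ys with
  | nil => intro _ _ h _; exact absurd rfl h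
  | cons y ys ih =>
    intro rows cur _ h
    simp only [List.length_cons] at h
    simp only [List.foldl_cons, chunkStepB]
    cases ys with
    | nil =>
      simp only [List.length_nil] at h
      have hl : (cur ++ [some y]).length = size := by
        simp only [List.length_append, List.length_cons, List.length_nil]
        omega
      rw [if_pos hl]
      simp
    | cons y2 ys2 =>
      simp only [List.length_cons] at h
      have hl : ¬ ((cur ++ [some y]).length = size) := by
        simp only [List.length_append, List.length_cons, List.length_nil]
        omega
      rw [if_neg hl]
      have hrec := ih rows (cur ++ [some y]) (by simp)
        (by simp only [List.length_append, List.length_cons, List.length_nil]; omega)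
      simp only [hrec]
      simp

theorem fold_main (size : Nat) (hs : 0 < size) (xs : List Int) :
    ∀ (rows : List (List (Option Int))),
      xs.foldl (chunkStepB size) (rows, []) = (rows ++ fullchunksB size xs, leftoverB size xs) := by
  intro rows
  by_cases h : size ≤ xs.length
  · have hsplit : xs = xs.take size ++ xs.drop size := (List.take_append_drop size xs).symm
    conv_lhs => rw [hsplit]
    rw [List.foldl_append]
    have h1 : (xs.take size).length = size := by simp; omega
    have hne : xs.take size ≠ [] := by
      intro hc; rw [hc] at h1; simp at h1; omega
    rw [fold_fill size (xs.take size) rows [] hne (by simpa using h1)]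
    rw [fold_main size hs (xs.drop size) (rows ++ [[] ++ (xs.take size).map some])]
    have e1 : fullchunksB size xs = (xs.take size).map some :: fullchunksB size (xs.drop size) := by
      rw [fullchunksB, dif_pos ⟨hs, h⟩]
    have e2 : leftoverB size xs = leftoverB size (xs.drop size) := by
      rw [leftoverB, dif_pos ⟨hs, h⟩]
    rw [e1, e2]
    simp
  · rw [fold_small size xs rows [] (by simp; omega)]
    rw [fullchunksB, leftoverB, dif_neg (by omega), dif_neg (by omega)]
    simp
termination_by xs.length
decreasing_by simp; omega

theorem fullchunksB_eq (size : Nat) (hs : 0 < size) (xs : List Int) :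
    fullchunksB size xs =
      (List.range (xs.length / size)).map (fun j => ((xs.drop (j * size)).take size).map some) := by
  by_cases h : size ≤ xs.length
  · rw [fullchunksB, dif_pos ⟨hs, h⟩, fullchunksB_eq size hs (xs.drop size)]
    have hlen : (xs.drop size).length = xs.length - size := by simp
    have hdiv : xs.length / size = (xs.length - size) / size + 1 := by
      rw [Nat.div_eq_sub_div hs h]
    rw [hlen, hdiv, List.range_succ_eq_map]
    simp only [List.map_cons, List.map_map]
    congr 1
    · simp
    · apply List.map_congr_left
      intro j _
      simp only [Function.comp]
      rw [List.drop_drop]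
      have he : (j + 1) * size = size + j * size := by
        rw [add_mul, one_mul, Nat.add_comm]
      rw [he]
  · rw [fullchunksB, dif_neg (by omega)]
    have : xs.length / size = 0 := Nat.div_eq_of_lt (by omega)
    rw [this]
    simp
termination_by xs.length
decreasing_by simp; omega

theorem leftoverB_eq (size : Nat) (hs : 0 < size) (xs : List Int) :
    leftoverB size xs = (xs.drop (xs.length / size * size)).map some := by
  by_cases h : size ≤ xs.length
  · rw [leftoverB, dif_pos ⟨hs, h⟩, leftoverB_eq size hs (xs.drop size)]
    have hlen : (xs.drop size).length = xs.length - size := by simp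
    have hdiv : xs.length / size = (xs.length - size) / size + 1 := by
      rw [Nat.div_eq_sub_div hs h]
    rw [hlen, List.drop_drop, hdiv]
    have he : ((xs.length - size) / size + 1) * size = size + (xs.length - size) / size * size := by
      rw [add_mul, one_mul, Nat.add_comm]
    rw [he]
  · rw [leftoverB, dif_neg (by omega)]
    have : xs.length / size = 0 := Nat.div_eq_of_lt (by omega)
    rw [this]
    simp
termination_by xs.length
decreasing_by simp; omega

-- A's row i, after padWhileA_eq and unfolding the slice
theorem rowA_eq (lst : List Int) (size i : Nat) :
    padWhileA size ((PySem.List.slice lst (some ((i * size : Nat) : Int))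
        (some (((i * size : Nat) : Int) + (size : Int)))).map some)
      = ((lst.drop (i * size)).take size).map some ++
          List.replicate (size - min size (lst.length - i * size)) none := by
  have hsz : ((i * size : Nat) : Int) + (size : Int) = (((i * size + size : Nat)) : Int) := by
    push_cast; ring
  rw [hsz, PySem.List.slice_natCast, padWhileA_eq]
  have h1 : i * size + size - i * size = size := by omega
  rw [h1]
  congr 2
  simp
theorem alt_nil : transform_to_square_alt [] = [] := by
  unfold transform_to_square_alt
  rw [sizeLoopB_eq]
  simp only [List.length_nil, List.foldl_nil]
  have h0 : sizeA 0 = 0 := by simp [sizeA]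
  rw [h0]
  simp [padRowsB_eq]

theorem a_nil : transform_to_square [] = [] := by
  unfold transform_to_square
  simp

theorem transform_eq (lst : List Int) : transform_to_square lst = transform_to_square_alt lst := by
  by_cases hnil : lst = []
  · rw [hnil, a_nil, alt_nil]
  · -- main case: lst nonempty, so size ≥ 1
    have hn1 : 0 < lst.length := List.length_pos_iff.mpr hnil
    have hpos : 0 < sizeA lst.length := by
      by_contra h
      have h0 : sizeA lst.length = 0 := by omega
      have := sizeA_sq_ge lst.length
      rw [h0] at this
      omega
    have hsz : (if Nat.sqrt lst.length * Nat.sqrt lst.length ≠ lst.length then Nat.sqrt lst.length + 1 else Nat.sqrt lst.length) = sizeA lst.length := rfl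
    unfold transform_to_square transform_to_square_alt
    simp only [hsz, sizeLoopB_eq]
    rw [fold_main (sizeA lst.length) hpos lst []]
    simp only [List.nil_append]
    rw [fullchunksB_eq _ hpos, leftoverB_eq _ hpos]
    rw [List.map_map,
      show padWhileA (sizeA lst.length) ∘
          (fun i => (PySem.List.slice lst (some ((i * sizeA lst.length : Nat) : Int))
            (some (((i * sizeA lst.length : Nat) : Int) + ((sizeA lst.length : Nat) : Int)))).map some)
        = fun i => ((lst.drop (i * sizeA lst.length)).take (sizeA lst.length)).map some ++
            List.replicate (sizeA lst.length - min (sizeA lst.length) (lst.length - i * sizeA lst.length)) none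
        from funext (fun i => rowA_eq lst (sizeA lst.length) i)]
    set n := lst.length with hndef
    set s := sizeA n with hsdef
    set q := n / s with hqdef
    have hns : n ≤ s * s := by rw [hsdef]; exact sizeA_sq_ge n
    have hqr : q * s + n % s = n := by rw [hqdef]; exact Nat.div_add_mod' n s
    have hrs : n % s < s := Nat.mod_lt n (by rw [hsdef]; exact hpos)
    have hql : q * s ≤ n := by omega
    have hqs : q ≤ s := by
      by_contra hc
      have h3 : (s + 1) * s ≤ q * s := Nat.mul_le_mul_right s (by omega)
      rw [add_mul, one_mul] at h3
      omega
    by_cases hr0 : n % s = 0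
    · -- no partial chunk: drop (q*s) lst = []
      have hdn : lst.drop (q * s) = [] := by
        apply List.drop_eq_nil_of_le
        omega
      rw [hdn]
      simp only [List.map_nil, ne_eq, not_true_eq_false, if_false]
      rw [padRowsB_eq]
      apply List.ext_getElem
      · simp; omega
      · intro i h1 h2
        simp only [List.length_map, List.length_range] at h1
        rw [List.getElem_map, List.getElem_range]
        rw [List.getElem_append]
        split
        · rename_i hi
          simp only [List.length_map, List.length_range] at hi
          rw [List.getElem_map, List.getElem_range]
          have h3 : (i + 1) * s ≤ q * s := Nat.mul_le_mul_right s (by omega)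
          rw [add_mul, one_mul] at h3
          have h4 : s - min s (n - i * s) = 0 := by omega
          rw [h4]
          simp
        · rename_i hi
          simp only [List.length_map, List.length_range] at hi
          rw [List.getElem_replicate]
          have h3 : q * s ≤ i * s := Nat.mul_le_mul_right s (by omega)
          have h4 : lst.drop (i * s) = [] := by
            apply List.drop_eq_nil_of_le
            omega
          rw [h4]
          have h5 : min s (n - i * s) = 0 := by omega
          rw [h5]
          simp
    · -- a partial chunk of length n % s remains
      have hlen : (lst.drop (q * s)).length = n % s := by
        simp
        omega
      have hne2 : (lst.drop (q * s)).map some ≠ [] := by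
        intro hc
        have := congrArg List.length hc
        simp at this
        omega
      rw [if_pos hne2]
      rw [padRowsB_eq]
      have hq1 : q + 1 ≤ s := by
        by_contra hc
        have h3 : s * s ≤ q * s := Nat.mul_le_mul_right s (by omega)
        omega
      apply List.ext_getElem
      · simp; omega
      · intro i h1 h2
        simp only [List.length_map, List.length_range] at h1
        rw [List.getElem_map, List.getElem_range]
        rw [List.getElem_append]
        split
        · rename_i hi
          simp only [List.length_append, List.length_map, List.length_range, List.length_cons,
            List.length_nil] at hi
          rw [List.getElem_append]
          split
          · rename_i hi2
            simp only [List.length_map, List.length_range] at hi2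
            rw [List.getElem_map, List.getElem_range]
            have h3 : (i + 1) * s ≤ q * s := Nat.mul_le_mul_right s (by omega)
            rw [add_mul, one_mul] at h3
            have h4 : s - min s (n - i * s) = 0 := by omega
            rw [h4]
            simp
          · rename_i hi2
            simp only [List.length_map, List.length_range] at hi2
            have hieq : i = q := by omega
            rw [List.getElem_singleton, hieq]
            have h4 : (lst.drop (q * s)).take s = lst.drop (q * s) := by
              apply List.take_of_length_le
              rw [hlen]
              omega
            rw [h4]
            have h5 : min s (n - q * s) = n % s := by omega
            rw [h5]
            simp
            omega
        · rename_i hi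
          simp only [List.length_append, List.length_map, List.length_range, List.length_cons,
            List.length_nil] at hi
          rw [List.getElem_replicate]
          have h3 : (q + 1) * s ≤ i * s := Nat.mul_le_mul_right s (by omega)
          rw [add_mul, one_mul] at h3
          have h4 : lst.drop (i * s) = [] := by
            apply List.drop_eq_nil_of_le
            omega
          rw [h4]
          have h5 : min s (n - i * s) = 0 := by omega
          rw [h5]
          simp

-- ===== VERDICT (by name: the statement is the Claim_ definition above) =====
theorem transform_to_square_spec : Claim_equal_transform_to_square := by
  intro lst _
  exact transform_eq lst
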